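-- pv_equiv track=rewrite | github.com/prompteus/calc-x | gadgets/gsm8k.py | add_missing_dots
-- ===== SOURCE A (Python) =====
-- def add_missing_dots(input_string: str):
--     lines = input_string.split("\n")
--     result = []
--
--     for line, next_line in zip(lines, lines[1:] + [""]):
--         if line != "" and line[-1].strip().isalnum() and (next_line == "" or next_line[0].isupper()):
--             line += "."
--         result.append(line)
--
--     return "\n".join(result)
-- ===== SOURCE B (Python) =====
-- def add_missing_dots(input_string: str):
--     # Streaming state machine over the characters: no split, no zip, no lookahead list.
--     out = []
--     hold = False  # an eligible line-ending '\n' is withheld; dot decision pending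
--     last = None   # last char of the current line, or None while the line is empty
--     for c in input_string:
--         if hold:
--             out.append(".\n" if (c == "\n" or c.isupper()) else "\n")
--             hold = False
--         if c == "\n":
--             if last is not None and last.strip().isalnum():
--                 hold = True
--             else:
--                 out.append("\n")
--             last = None
--         else:
--             out.append(c)
--             last = c
--     if hold:
--         out.append(".\n")
--     elif last is not None and last.strip().isalnum():
--         out.append(".")
--     return "".join(out)
-- ===== Notes on version B (the rewrite author's own statement) =====
-- stated objective: alternative
-- what changed: B is a single streaming character-level state machine (withheld-newline flag + last-char register) instead of A's split-into-lines, zip-with-shifted-copy, join pipeline.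
import Mathlib
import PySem

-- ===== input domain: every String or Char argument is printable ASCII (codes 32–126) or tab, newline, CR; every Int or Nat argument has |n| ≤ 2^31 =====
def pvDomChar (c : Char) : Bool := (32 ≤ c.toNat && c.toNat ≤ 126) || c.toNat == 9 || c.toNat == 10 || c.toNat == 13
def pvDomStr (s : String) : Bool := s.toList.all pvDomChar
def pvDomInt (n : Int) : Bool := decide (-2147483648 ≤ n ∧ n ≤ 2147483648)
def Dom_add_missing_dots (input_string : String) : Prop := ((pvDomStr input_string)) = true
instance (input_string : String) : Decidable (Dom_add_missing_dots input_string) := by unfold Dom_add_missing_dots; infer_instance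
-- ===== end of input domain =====

-- B replaces A's split / zip-with-shifted-copy / join pipeline by a single streaming
-- character-level state machine (objective: alternative decomposition, same cost).

-- ===== PORT A =====
-- line[-1].strip().isalnum()
def pvLastStripAlnumA (line : List Char) : Bool :=
  PySem.Chars.strIsalnum (PySem.Chars.strip
    (match PySem.List.pyGet? line (-1) with | some c => [c] | none => []))

-- the body of A's loop: maybe-dot one line given the following line
def pvDotLineA (line next_line : List Char) : List Char :=
  if (decide (line ≠ []) && pvLastStripAlnumA line &&
      (decide (next_line = []) ||
        (match PySem.List.pyGet? next_line 0 with | some c => PySem.Chars.isupper c | none => false))) = true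
  then line ++ ['.'] else line

def add_missing_dots (input_string : String) : String :=
  let lines := PySem.Chars.splitOn input_string.toList ['\n']
  let result := (lines.zip (lines.drop 1 ++ [[]])).foldl
    (fun acc p => acc ++ [pvDotLineA p.1 p.2]) []
  String.mk (PySem.Chars.join ['\n'] result)

-- ===== PORT B =====
-- c.strip().isalnum() for the remembered one-character string
def pvDotC (c : Char) : Bool := PySem.Chars.strIsalnum (PySem.Chars.strip [c])

-- the body of B's loop: state = (emitted output, hold flag, last char of current line)
def pvStepB (st : List Char × Bool × Option Char) (c : Char) : List Char × Bool × Option Char :=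
  let out := if st.2.1 then
      st.1 ++ (if (decide (c = '\n') || PySem.Chars.isupper c) = true then ['.', '\n'] else ['\n'])
    else st.1
  if c = '\n' then
    if (match st.2.2 with | some l => pvDotC l | none => false) = true then (out, true, none)
    else (out ++ ['\n'], false, none)
  else (out ++ [c], false, some c)

def add_missing_dots_alt (input_string : String) : String :=
  let st := input_string.toList.foldl pvStepB ([], false, none)
  let out := if st.2.1 then st.1 ++ ['.', '\n']
    else match st.2.2 with
      | some l => if pvDotC l then st.1 ++ ['.'] else st.1
      | none => st.1
  String.mk out

-- ===== PRECONDITION & SPEC =====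
def Spec_add_missing_dots (input_string : String) (out : String) : Prop := out = add_missing_dots_alt input_string
instance (input_string : String) (out : String) : Decidable (Spec_add_missing_dots input_string out) := by unfold Spec_add_missing_dots; infer_instance

-- ===== CLAIM (what is proved, stated in full; the proofs are below) =====
def Claim_equal_add_missing_dots : Prop := ∀ (input_string : String), Dom_add_missing_dots input_string → Spec_add_missing_dots input_string (add_missing_dots input_string)

-- ===== LEMMAS AND PROOFS =====

-- ---- a simple structural characterisation of splitting on '\n' ----
def pvLines : List Char → List (List Char)
  | [] => [[]]
  | c :: rest =>
    if c = '\n' then [] :: pvLines rest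
    else
      match pvLines rest with
      | [] => [[c]]
      | h :: t => (c :: h) :: t

lemma pvLines_ne_nil (s : List Char) : pvLines s ≠ [] := by
  cases s with
  | nil => simp [pvLines]
  | cons c rest =>
    simp only [pvLines]
    split
    · simp
    · split <;> simp

lemma pvInter_singleton (sep a : List Char) :
    List.intercalate sep [a] = a := by
  simp [List.intercalate]

lemma pvInter_cons₂ (sep a b : List Char) (t : List (List Char)) :
    List.intercalate sep (a :: b :: t) = a ++ sep ++ List.intercalate sep (b :: t) := by
  simp [List.intercalate, List.intersperse_cons₂]

lemma pvSplitOn_go_eq (fuel : Nat) (l cur : List Char) (acc : List (List Char))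
    (hf : l.length < fuel) :
    PySem.Chars.splitOn.go ['\n'] fuel l cur acc
      = acc.reverse ++ (cur.reverse ++ (pvLines l).headD []) :: (pvLines l).tail := by
  induction fuel generalizing l cur acc with
  | zero => omega
  | succ f ih =>
    cases l with
    | nil =>
      rw [PySem.Chars.splitOn.go]
      · simp [pvLines]
      · omega
    | cons c rest =>
      rw [PySem.Chars.splitOn.go]
      by_cases hc : c = '\n'
      · rw [if_pos (by simp [List.isPrefixOf, hc])]
        simp only [List.length_cons, List.length_nil, List.drop_succ_cons, List.drop_zero]
        rw [ih rest [] (cur.reverse :: acc) (by simp at hf ⊢; omega)]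
        rcases hL : pvLines rest with _ | ⟨h0, t0⟩
        · exact absurd hL (pvLines_ne_nil rest)
        · simp [pvLines, hc, hL]
      · rw [if_neg (by simp [List.isPrefixOf]; intro h; exact absurd h.symm hc)]
        rw [ih rest (c :: cur) acc (by simp at hf ⊢; omega)]
        simp only [pvLines, if_neg hc]
        rcases hL : pvLines rest with _ | ⟨h0, t0⟩
        · exact absurd hL (pvLines_ne_nil rest)
        · simp

lemma pvSplitOn_eq_pvLines (s : List Char) :
    PySem.Chars.splitOn s ['\n'] = pvLines s := by
  show PySem.Chars.splitOn.go ['\n'] (s.length + 1) s [] [] = pvLines s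
  rw [pvSplitOn_go_eq (s.length + 1) s [] [] (by omega)]
  rcases hL : pvLines s with _ | ⟨h0, t0⟩
  · exact absurd hL (pvLines_ne_nil s)
  · simp

lemma pvLines_no_nl (s : List Char) : ∀ l ∈ pvLines s, '\n' ∉ l := by
  induction s with
  | nil => simp [pvLines]
  | cons c rest ih =>
    intro l hl
    simp only [pvLines] at hl
    by_cases hc : c = '\n'
    · rw [if_pos hc] at hl
      rcases List.mem_cons.mp hl with h | h
      · simp [h]
      · exact ih l h
    · rw [if_neg hc] at hl
      rcases hL : pvLines rest with _ | ⟨h0, t0⟩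
      · exact absurd hL (pvLines_ne_nil rest)
      · rw [hL] at hl
        rcases List.mem_cons.mp hl with h | h
        · subst h
          intro hmem
          rcases List.mem_cons.mp hmem with h | h
          · exact hc h.symm
          · exact ih h0 (by simp [hL]) h
        · exact ih l (by rw [hL]; exact List.mem_cons_of_mem _ h)

lemma pvLines_intercalate (s : List Char) :
    List.intercalate ['\n'] (pvLines s) = s := by
  induction s with
  | nil => simp [pvLines, pvInter_singleton]
  | cons c rest ih =>
    simp only [pvLines]
    by_cases hc : c = '\n'
    · rw [if_pos hc]
      rcases hL : pvLines rest with _ | ⟨h0, t0⟩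
      · exact absurd hL (pvLines_ne_nil rest)
      · rw [pvInter_cons₂, ← hL, ih, hc]
        simp
    · rw [if_neg hc]
      rcases hL : pvLines rest with _ | ⟨h0, t0⟩
      · exact absurd hL (pvLines_ne_nil rest)
      · rw [hL] at ih
        cases t0 with
        | nil =>
          rw [pvInter_singleton] at ih ⊢
          rw [ih]
        | cons b t1 =>
          rw [pvInter_cons₂] at ih ⊢
          simp only [List.append_assoc, List.singleton_append] at ih ⊢
          simp only [List.cons_append]
          rw [ih]

-- ---- characterisation of A's loop ----
def pvGA : List (List Char) → List (List Char)
  | [] => []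
  | l :: rest => pvDotLineA l (rest.headD []) :: pvGA rest

lemma pvA_fold (lines : List (List Char)) (acc0 : List (List Char)) :
    (lines.zip (lines.drop 1 ++ [[]])).foldl (fun acc p => acc ++ [pvDotLineA p.1 p.2]) acc0
      = acc0 ++ pvGA lines := by
  induction lines generalizing acc0 with
  | nil => simp [pvGA]
  | cons l rest ih =>
    cases rest with
    | nil => simp [pvGA]
    | cons r rs =>
      simp only [List.drop_succ_cons, List.drop_zero, List.cons_append, List.zip_cons_cons,
        List.foldl_cons, pvGA]
      simp only [List.drop_succ_cons, List.drop_zero] at ih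
      rw [ih]
      cases rs <;> simp [pvGA]

-- ---- characterisation of B's scan ----

-- "line == '' or line[0].isupper()" of a candidate next line
def pvBoundary (l : List Char) : Bool :=
  match l with
  | [] => true
  | c :: _ => PySem.Chars.isupper c

-- what the withheld newline turns into once the next line's first fact is known
def pvRelTop (h : Bool) (ls : List (List Char)) : List Char :=
  if h then (if pvBoundary (ls.headD []) then ['.', '\n'] else ['\n']) else []

def pvFinB (st : List Char × Bool × Option Char) : List Char :=
  if st.2.1 then st.1 ++ ['.', '\n']
  else match st.2.2 with
    | some l => if pvDotC l then st.1 ++ ['.'] else st.1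
    | none => st.1

-- A's "line[-1]" / "next_line[0]" tests, re-read through getLast? / head?
lemma pvLastStripAlnumA_eq (m : List Char) :
    pvLastStripAlnumA m = (match m.getLast? with | some c => pvDotC c | none => false) := by
  have hg : PySem.List.pyGet? m (-1) = m.getLast? := by simp [pysem]
  cases hL : m.getLast? with
  | none => rw [pvLastStripAlnumA, hg, hL]; decide
  | some c => rw [pvLastStripAlnumA, hg, hL]; simp [pvDotC]

lemma pvDotLineA_eq (m nxt : List Char) :
    pvDotLineA m nxt
      = if (decide (m ≠ []) &&
            (match m.getLast? with | some c => pvDotC c | none => false) &&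
            pvBoundary nxt) = true
        then m ++ ['.'] else m := by
  have h0 : PySem.List.pyGet? nxt 0 = nxt.head? := by
    simp [pysem]
    exact List.head?_eq_getElem?.symm
  rw [pvDotLineA, pvLastStripAlnumA_eq]
  cases nxt <;> simp [pvBoundary, h0]

-- releasing the hold is the same as pre-extending the output
lemma pvStepB_release (out : List Char) (la : Option Char) (c : Char) :
    pvStepB (out, true, la) c
      = pvStepB (out ++ (if (decide (c = '\n') || PySem.Chars.isupper c) = true
                          then ['.', '\n'] else ['\n']), false, la) c := by
  simp [pvStepB]

-- scanning a newline-free line just copies it and remembers its last char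
lemma pvRunLine (m : List Char) (hm : '\n' ∉ m) (out : List Char) (la : Option Char) :
    m.foldl pvStepB (out, false, la) = (out ++ m, false, (m.getLast?).or la) := by
  induction m generalizing out la with
  | nil => simp
  | cons c m' ih =>
    have hc : ¬ (c = '\n') := fun h => hm (by simp [h])
    have hm' : '\n' ∉ m' := fun h => hm (by simp [h])
    rw [List.foldl_cons]
    have hstep : pvStepB (out, false, la) c = (out ++ [c], false, some c) := by
      simp [pvStepB, hc]
    rw [hstep, ih hm' (out ++ [c]) (some c)]
    cases m' with
    | nil => simp
    | cons d m'' =>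
      obtain ⟨x, hx⟩ := Option.isSome_iff_exists.mp
        (List.getLast?_isSome.mpr (by simp) : ((d :: m'').getLast?).isSome = true)
      simp [hx]

-- main invariant: the whole scan + epilogue over joined newline-free lines
lemma pvMain (ls : List (List Char)) (hnl : ∀ l ∈ ls, '\n' ∉ l) (out : List Char) (h : Bool) :
    pvFinB ((List.intercalate ['\n'] ls).foldl pvStepB (out, h, none))
      = out ++ pvRelTop h ls ++ List.intercalate ['\n'] (pvGA ls) := by
  induction ls generalizing out h with
  | nil => cases h <;> simp [pvFinB, pvRelTop, pvBoundary, pvGA, List.intercalate]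
  | cons m rest ih =>
    have hm : '\n' ∉ m := hnl m (List.mem_cons_self)
    have hrest : ∀ l ∈ rest, '\n' ∉ l := fun l hl => hnl l (List.mem_cons_of_mem _ hl)
    cases m with
    | nil =>
      -- empty first line
      cases rest with
      | nil =>
        cases h <;>
          simp [pvFinB, pvRelTop, pvBoundary, pvGA, pvDotLineA_eq, pvInter_singleton]
      | cons r rs =>
        rw [pvInter_cons₂]
        simp only [List.nil_append, List.singleton_append, List.foldl_cons]
        have hGA : pvGA ([] :: r :: rs) = [] :: pvGA (r :: rs) := by
          simp [pvGA, pvDotLineA_eq]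
        cases h with
        | false =>
          have hstep : pvStepB (out, false, none) '\n' = (out ++ ['\n'], false, none) := by
            simp [pvStepB]
          rw [hstep, ih hrest (out ++ ['\n']) false]
          have hG : pvGA (r :: rs) = pvDotLineA r (rs.headD []) :: pvGA rs := rfl
          rw [hGA, hG, pvInter_cons₂, ← hG]
          simp [pvRelTop]
        | true =>
          have hstep : pvStepB (out, true, none) '\n'
              = (out ++ ['.', '\n'] ++ ['\n'], false, none) := by
            simp [pvStepB]
          rw [hstep, ih hrest (out ++ ['.', '\n'] ++ ['\n']) false]
          have hG : pvGA (r :: rs) = pvDotLineA r (rs.headD []) :: pvGA rs := rfl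
          rw [hGA, hG, pvInter_cons₂, ← hG]
          simp [pvRelTop, pvBoundary]
    | cons c m' =>
      have hc : ¬ (c = '\n') := fun hcc => hm (by simp [hcc])
      -- discharge an initial hold: it only prepends the released newline to the output
      have hrel : ∀ out' : List Char,
          pvFinB ((List.intercalate ['\n'] ((c :: m') :: rest)).foldl pvStepB (out', true, none))
            = pvFinB ((List.intercalate ['\n'] ((c :: m') :: rest)).foldl pvStepB
                (out' ++ (if PySem.Chars.isupper c then ['.', '\n'] else ['\n']), false, none)) := by
        intro out'
        have hhead : ∃ tl, List.intercalate ['\n'] ((c :: m') :: rest) = c :: tl := by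
          cases rest with
          | nil => exact ⟨m', pvInter_singleton _ _⟩
          | cons r rs => exact ⟨m' ++ '\n' :: List.intercalate ['\n'] (r :: rs),
              by rw [pvInter_cons₂]; simp⟩
        obtain ⟨tl, htl⟩ := hhead
        rw [htl, List.foldl_cons, List.foldl_cons, pvStepB_release]
        simp [hc]
      -- it now suffices to prove the hold-free case for every output prefix
      have hmain : ∀ out' : List Char,
          pvFinB ((List.intercalate ['\n'] ((c :: m') :: rest)).foldl pvStepB (out', false, none))
            = out' ++ List.intercalate ['\n'] (pvGA ((c :: m') :: rest)) := by
        intro out'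
        cases rest with
        | nil =>
          simp only [pvInter_singleton]
          rw [pvRunLine (c :: m') hm out' none]
          have hGA : pvGA [c :: m']
              = [if (match (c :: m').getLast? with | some x => pvDotC x | none => false) = true
                 then (c :: m') ++ ['.'] else (c :: m')] := by
            simp [pvGA, pvDotLineA_eq, pvBoundary]
          rw [hGA]
          rcases hL : (c :: m').getLast? with _ | lc
          · exact absurd (List.getLast?_isSome.mpr (by simp) :
              ((c :: m').getLast?).isSome = true) (by simp [hL])
          · by_cases hd : pvDotC lc = true <;>
              simp [pvFinB, hd, pvInter_singleton, Option.or]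
        | cons r rs =>
          rw [pvInter_cons₂]
          simp only [List.append_assoc, List.singleton_append, List.foldl_append]
          rw [pvRunLine (c :: m') hm out' none, List.foldl_cons]
          rcases hL : (c :: m').getLast? with _ | lc
          · exact absurd (List.getLast?_isSome.mpr (by simp) :
              ((c :: m').getLast?).isSome = true) (by simp [hL])
          · have hGA : pvGA ((c :: m') :: r :: rs)
                = (if (pvDotC lc && pvBoundary r) = true then (c :: m') ++ ['.'] else (c :: m'))
                    :: pvGA (r :: rs) := by
              simp [pvGA, pvDotLineA_eq, hL]
            have hG : pvGA (r :: rs) = pvDotLineA r (rs.headD []) :: pvGA rs := rfl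
            rw [hGA, hG, pvInter_cons₂, ← hG]
            by_cases hd : pvDotC lc = true
            · have hstep : pvStepB (out' ++ (c :: m'), false, Option.or (some lc) none) '\n'
                  = (out' ++ (c :: m'), true, none) := by
                simp [pvStepB, hd]
              rw [hstep, ih hrest (out' ++ (c :: m')) true]
              by_cases hb : pvBoundary r = true <;>
                simp [pvRelTop, hb, hd]
            · have hstep : pvStepB (out' ++ (c :: m'), false, Option.or (some lc) none) '\n'
                  = (out' ++ (c :: m') ++ ['\n'], false, none) := by
                simp [pvStepB, hd]
              rw [hstep, ih hrest (out' ++ (c :: m') ++ ['\n']) false]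
              simp [pvRelTop, hd]
      cases h with
      | false => rw [hmain out]; simp [pvRelTop]
      | true =>
        rw [hrel out, hmain]
        simp [pvRelTop, pvBoundary]

-- ===== VERDICT (by name: the statement is the Claim_ definition above) =====
theorem add_missing_dots_spec : Claim_equal_add_missing_dots := by
  intro s _
  show add_missing_dots s = add_missing_dots_alt s
  have hA : add_missing_dots s
      = String.mk (List.intercalate ['\n'] (pvGA (pvLines s.toList))) := by
    simp only [add_missing_dots, PySem.Chars.join, pvSplitOn_eq_pvLines]
    rw [pvA_fold]
    simp
  have hB : add_missing_dots_alt s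
      = String.mk (pvFinB (s.toList.foldl pvStepB ([], false, none))) := rfl
  have hM := pvMain (pvLines s.toList) (pvLines_no_nl s.toList) [] false
  rw [pvLines_intercalate] at hM
  rw [hA, hB, hM]
  simp [pvRelTop]
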